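-- pv_equiv track=rewrite | github.com/jjbrophy47/sn_spam | one_off/sim.py | _merge_identical_groups
-- ===== SOURCE A (Python) =====
-- def _merge_identical_groups(groups):
--     g = {}
--     vals = list(groups.values())
--
--     while len(vals) > 0:
--         v1 = vals.pop()
--         keys = set()
--
--         for k2, v2 in groups.items():
--             if v1 == v2:
--                 keys.add(k2)
--
--         vals = [v for v in vals if v != v1]
--         g[min(keys)] = v1
--
--     return g
-- ===== SOURCE B (Python) =====
-- def _merge_identical_groups(groups):
--     info = {}
--     for k, v in reversed(groups.items()):
--         t = tuple(v)
--         e = info.get(t)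
--         if e is None:
--             info[t] = (v, k)
--         elif k < e[1]:
--             info[t] = (e[0], k)
--     return {mk: v for v, mk in info.values()}
-- ===== Notes on version B (the rewrite author's own statement) =====
-- stated objective: faster
-- what changed: A repeatedly rescans the whole dict and the remaining value list for every distinct value (quadratic); B makes one reverse pass over the items, grouping by the value (as a tuple key) in a dict while tracking the minimum key, then emits min-key->value pairs.
import Mathlib
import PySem

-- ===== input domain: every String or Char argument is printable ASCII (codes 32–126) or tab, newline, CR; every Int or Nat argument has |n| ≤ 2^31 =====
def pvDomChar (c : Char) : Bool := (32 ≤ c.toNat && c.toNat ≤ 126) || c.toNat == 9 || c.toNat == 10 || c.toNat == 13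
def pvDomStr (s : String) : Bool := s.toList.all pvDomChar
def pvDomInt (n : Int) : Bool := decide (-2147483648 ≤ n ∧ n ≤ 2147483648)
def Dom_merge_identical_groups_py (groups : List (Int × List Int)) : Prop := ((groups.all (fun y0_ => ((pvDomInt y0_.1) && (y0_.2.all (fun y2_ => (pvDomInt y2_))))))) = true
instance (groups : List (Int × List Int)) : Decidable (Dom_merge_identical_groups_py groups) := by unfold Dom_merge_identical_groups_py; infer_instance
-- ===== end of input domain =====

-- B replaces A's quadratic while-loop (rescan the whole dict for every distinct value)
-- by one pass over the items that groups values in a dict keyed by the value, tracking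
-- the minimum key; the claimed objective is 'faster' (asymptotic).

-- ===== PORT A =====
-- the while-loop of A: pop the last value, collect all keys carrying it, drop its
-- duplicates from vals, record min(keys) -> value
def mergeLoopA (groups : List (Int × List Int)) (g : PySem.Dict Int (List Int))
    (vals : List (List Int)) : PySem.Dict Int (List Int) :=
  match hv : vals.getLast? with
  | none => g
  | some v1 =>
    let keys : PySem.Set Int :=
      groups.foldl (fun s kv => if kv.2 = v1 then PySem.Set.add s kv.1 else s) PySem.Set.empty
    let vals' := vals.dropLast.filter (fun v => v ≠ v1)
    -- min(keys): keys is nonempty at every call (v1 is a value of groups), so the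
    -- `.getD 0` default is unreachable; Python's min would raise only on an empty set
    mergeLoopA groups (g.insert ((PySem.List.min? keys (fun x => x)).getD 0) v1) vals'
termination_by vals.length
decreasing_by
  have h1 : vals ≠ [] := by intro h; simp [h] at hv
  have h3 := List.length_filter_le (fun v => decide (v ≠ v1)) vals.dropLast
  have h2 : vals.dropLast.length < vals.length := by
    cases vals with
    | nil => exact absurd rfl h1
    | cons a t => simp
  omega

def merge_identical_groups_py (groups : List (Int × List Int)) : List (Int × List Int) :=
  (mergeLoopA groups PySem.Dict.empty (groups.map Prod.snd)).items

-- ===== PORT B =====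
def merge_identical_groups_py_alt (groups : List (Int × List Int)) : List (Int × List Int) :=
  let info : PySem.Dict (List Int) (List Int × Int) :=
    groups.reverse.foldl (fun info kv =>
      match info.get? kv.2 with
      | none => info.insert kv.2 (kv.2, kv.1)
      | some e => if kv.1 < e.2 then info.insert kv.2 (e.1, kv.1) else info)
      PySem.Dict.empty
  (info.values.foldl (fun g e => g.insert e.2 e.1)
    (PySem.Dict.empty : PySem.Dict Int (List Int))).items

-- ===== PRECONDITION & SPEC =====
def Spec_merge_identical_groups_py (groups : List (Int × List Int)) (out : List (Int × List Int)) : Prop := out = merge_identical_groups_py_alt groups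
instance (groups : List (Int × List Int)) (out : List (Int × List Int)) : Decidable (Spec_merge_identical_groups_py groups out) := by unfold Spec_merge_identical_groups_py; infer_instance

-- ===== CLAIM (what is proved, stated in full; the proofs are below) =====
def Claim_equal_merge_identical_groups_py : Prop := ∀ (groups : List (Int × List Int)), Dom_merge_identical_groups_py groups → Spec_merge_identical_groups_py groups (merge_identical_groups_py groups)


-- ===== LEMMAS AND PROOFS =====

-- distinct elements, keeping first occurrences, by repeated filtering (A's dedup pattern)
def dedupF : List (List Int) → List (List Int)
  | [] => []
  | x :: xs => x :: dedupF (xs.filter (fun v => v ≠ x))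
termination_by l => l.length
decreasing_by
  simp only [List.length_unattach, List.length_cons]
  exact Nat.lt_succ_of_le (le_trans (List.length_filter_le _ _) (by simp))

-- keys of `groups` carrying value v, in order
def occ (groups : List (Int × List Int)) (v : List Int) : List Int :=
  (groups.filter (fun kv => kv.2 = v)).map Prod.fst

def minOf : List Int → Int
  | [] => 0
  | x :: t => t.foldl min x

def minKey (groups : List (Int × List Int)) (v : List Int) : Int :=
  minOf (occ groups v)

lemma foldl_min_spec (t : List Int) :
    ∀ x : Int, t.foldl min x ∈ x :: t ∧ ∀ y ∈ x :: t, t.foldl min x ≤ y := by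
  induction t with
  | nil => intro x; simp
  | cons a t ih =>
    intro x
    obtain ⟨h1, h2⟩ := ih (min x a)
    simp only [List.foldl_cons]
    constructor
    · rcases List.mem_cons.mp h1 with h | h
      · rw [h]; rcases min_choice x a with hc | hc <;> rw [hc] <;> simp
      · simp [h]
    · intro y hy
      simp only [List.mem_cons] at hy
      rcases hy with rfl | rfl | hy
      · exact le_trans (h2 _ List.mem_cons_self) (min_le_left _ _)
      · exact le_trans (h2 _ List.mem_cons_self) (min_le_right _ _)
      · exact h2 _ (List.mem_cons_of_mem _ hy)

lemma minOf_mem_le (l : List Int) (hl : l ≠ []) :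
    minOf l ∈ l ∧ ∀ x ∈ l, minOf l ≤ x := by
  cases l with
  | nil => exact absurd rfl hl
  | cons a t => exact foldl_min_spec t a

lemma minOf_congr (l l' : List Int) (hl : l ≠ []) (hl' : l' ≠ [])
    (h : ∀ x, x ∈ l ↔ x ∈ l') : minOf l = minOf l' := by
  obtain ⟨hm, hle⟩ := minOf_mem_le l hl
  obtain ⟨hm', hle'⟩ := minOf_mem_le l' hl'
  exact le_antisymm (hle _ ((h _).mpr hm')) (hle' _ ((h _).mp hm))

lemma minOf_append_singleton (l : List Int) (x : Int) (hl : l ≠ []) :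
    minOf (l ++ [x]) = min (minOf l) x := by
  cases l with
  | nil => exact absurd rfl hl
  | cons a t => simp [minOf, List.foldl_append]

lemma mem_dedupF (l : List (List Int)) (y : List Int) : y ∈ dedupF l ↔ y ∈ l := by
  induction l using dedupF.induct with
  | case1 => simp [dedupF]
  | case2 x xs ih =>
    rw [List.unattach_filter (g := fun v => decide (v ≠ x)) (hf := fun a h => rfl),
        List.unattach_attach] at ih
    rw [dedupF]
    simp only [List.mem_cons, ih, List.mem_filter]
    by_cases hxy : y = x <;> simp [hxy]

lemma dedupF_append_singleton (l : List (List Int)) (x : List Int) :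
    dedupF (l ++ [x]) = if x ∈ l then dedupF l else dedupF l ++ [x] := by
  induction l using dedupF.induct with
  | case1 => simp [dedupF]
  | case2 a xs ih =>
    rw [List.unattach_filter (g := fun v => decide (v ≠ a)) (hf := fun c h => rfl),
        List.unattach_attach] at ih
    have hcons : (a :: xs) ++ [x] = a :: (xs ++ [x]) := rfl
    rw [hcons, dedupF, List.filter_append]
    by_cases hax : x = a
    · subst hax
      simp only [List.filter_cons]
      simp [dedupF]
    · have : List.filter (fun v => v ≠ a) [x] = [x] := by simp [hax]
      rw [this, ih, dedupF]
      by_cases hx : x ∈ xs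
      · have : x ∈ List.filter (fun v => v ≠ a) xs := List.mem_filter.mpr (by simp [hx, hax])
        simp [hx, this, hax]
      · have : x ∉ List.filter (fun v => v ≠ a) xs := fun h => hx (List.mem_filter.mp h).1
        simp [hx, this, hax]

lemma occ_append_singleton (p : List (Int × List Int)) (kv : Int × List Int) (v : List Int) :
    occ (p ++ [kv]) v = occ p v ++ if kv.2 = v then [kv.1] else [] := by
  simp only [occ, List.filter_append, List.map_append]
  by_cases h : kv.2 = v <;> simp [List.filter_cons, h]

lemma occ_eq_nil_of_not_mem (p : List (Int × List Int)) (v : List Int)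
    (h : v ∉ p.map Prod.snd) : occ p v = [] := by
  simp only [occ, List.map_eq_nil_iff, List.filter_eq_nil_iff]
  intro kv hkv hv
  exact h (List.mem_map.mpr ⟨kv, hkv, by simpa using hv⟩)

lemma occ_ne_nil_of_mem (p : List (Int × List Int)) (v : List Int)
    (h : v ∈ p.map Prod.snd) : occ p v ≠ [] := by
  obtain ⟨kv, hkv, hv⟩ := List.mem_map.mp h
  simp only [occ, ne_eq, List.map_eq_nil_iff, List.filter_eq_nil_iff]
  intro hall
  exact hall kv hkv (by simp [hv])

lemma occ_reverse (p : List (Int × List Int)) (v : List Int) :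
    ∀ x, x ∈ occ p.reverse v ↔ x ∈ occ p v := by
  intro x
  simp [occ, List.mem_filter]

lemma minKey_reverse (p : List (Int × List Int)) (v : List Int)
    (h : v ∈ p.map Prod.snd) : minKey p.reverse v = minKey p v := by
  have h' : v ∈ p.reverse.map Prod.snd := by simpa using h
  exact minOf_congr _ _ (occ_ne_nil_of_mem _ _ (by simpa using h')) (occ_ne_nil_of_mem _ _ h)
    (occ_reverse p v)

lemma min?_eq_minOf (l : List Int) (hl : l ≠ []) :
    PySem.List.min? l (fun x => x) = some (minOf l) := by
  cases hm : PySem.List.min? l (fun x => x) with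
  | none =>
    rw [PySem.List.min?_eq_none_iff] at hm
    exact absurd hm hl
  | some m =>
    obtain ⟨hmem, hle⟩ := minOf_mem_le l hl
    have h1 := PySem.List.min?_mem hm
    have h2 := PySem.List.min?_isMin hm
    exact congrArg some (le_antisymm (h2 _ hmem) (hle _ h1))

-- A's set-building loop collects exactly the keys occ groups v1
lemma keysSet_eq (groups : List (Int × List Int)) (v1 : List Int) (s : PySem.Set Int) :
    groups.foldl (fun s kv => if kv.2 = v1 then PySem.Set.add s kv.1 else s) s
      = PySem.Set.update s (occ groups v1) := by
  induction groups generalizing s with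
  | nil => simp [occ, PySem.Set.update]
  | cons kv gs ih =>
    rw [List.foldl_cons]
    by_cases h : kv.2 = v1
    · rw [if_pos h, ih]
      have hc : occ (kv :: gs) v1 = kv.1 :: occ gs v1 := by simp [occ, List.filter_cons, h]
      rw [hc, PySem.Set.update_cons]
    · rw [if_neg h, ih]
      have hc : occ (kv :: gs) v1 = occ gs v1 := by simp [occ, List.filter_cons, h]
      rw [hc]

-- A's min(keys) is minKey
lemma aMin_eq (groups : List (Int × List Int)) (v1 : List Int)
    (hv : v1 ∈ groups.map Prod.snd) :
    ((PySem.List.min?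
        (groups.foldl (fun s kv => if kv.2 = v1 then PySem.Set.add s kv.1 else s)
          PySem.Set.empty) (fun x => x)).getD 0) = minKey groups v1 := by
  rw [keysSet_eq, PySem.Set.update_empty]
  have hocc := occ_ne_nil_of_mem groups v1 hv
  have hne : PySem.Set.ofList (occ groups v1) ≠ [] := by
    intro h
    rcases List.exists_mem_of_ne_nil _ hocc with ⟨x, hx⟩
    have := (PySem.Set.mem_ofList _ _).mpr hx
    simp [h] at this
  rw [min?_eq_minOf _ hne]
  have := minOf_congr _ _ hne hocc (fun x => PySem.Set.mem_ofList _ _)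
  simp [this, minKey]

-- A's loop unfolds to a fold over the reversed-and-deduplicated value list
lemma mergeLoopA_eq (groups : List (Int × List Int)) :
    ∀ (vals : List (List Int)) (g : PySem.Dict Int (List Int)),
      (∀ v ∈ vals, v ∈ groups.map Prod.snd) →
      mergeLoopA groups g vals
        = (dedupF vals.reverse).foldl (fun g v => g.insert (minKey groups v) v) g := by
  have main : ∀ (n : Nat) (vals : List (List Int)) (g : PySem.Dict Int (List Int)),
      vals.length = n → (∀ v ∈ vals, v ∈ groups.map Prod.snd) →
      mergeLoopA groups g vals
        = (dedupF vals.reverse).foldl (fun g v => g.insert (minKey groups v) v) g := by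
    intro n
    induction n using Nat.strong_induction_on with
    | _ n ih =>
      intro vals g hlen hsub
      rw [mergeLoopA]
      split
      · next heq =>
        have : vals = [] := by
          cases vals with
          | nil => rfl
          | cons a t => simp [List.getLast?_concat] at heq
        subst this
        simp [dedupF]
      · next v1 heq =>
        obtain ⟨l', rfl⟩ := List.getLast?_eq_some_iff.mp heq
        have hv1mem : v1 ∈ groups.map Prod.snd := hsub v1 (by simp)
        have hdl : (l' ++ [v1]).dropLast = l' := by simp
        have hrev : (l' ++ [v1]).reverse = v1 :: l'.reverse := by simp
        have hfilt : l'.reverse.filter (fun v => v ≠ v1)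
            = (l'.filter (fun v => v ≠ v1)).reverse := by
          simp [List.filter_reverse]
        have hlt : (l'.filter (fun v => v ≠ v1)).length < n := by
          have := List.length_filter_le (fun v => decide (v ≠ v1)) l'
          simp only [← hlen, List.length_append, List.length_cons]
          simp at this ⊢
          omega
        have hsub' : ∀ v ∈ l'.filter (fun v => v ≠ v1), v ∈ groups.map Prod.snd := by
          intro v hv
          exact hsub v (List.mem_append_left _ (List.mem_filter.mp hv).1)
        show mergeLoopA groups _ ((l' ++ [v1]).dropLast.filter (fun v => v ≠ v1)) = _
        rw [hdl, hrev, dedupF, List.foldl_cons,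
            ih _ hlt _ _ rfl hsub', hfilt, aMin_eq groups v1 hv1mem]
  intro vals g hsub
  exact main vals.length vals g rfl hsub

-- the invariant dict of B's first loop after processing prefix p
def mkInfo (p : List (Int × List Int)) : PySem.Dict (List Int) (List Int × Int) :=
  PySem.Dict.mk ((dedupF (p.map Prod.snd)).map (fun v => (v, (v, minKey p v))))

lemma get?_mk_map (l : List (List Int)) (f : List Int → (List Int × Int)) (t : List Int) :
    (PySem.Dict.mk (l.map (fun v => (v, f v)))).get? t
      = if t ∈ l then some (f t) else none := by
  induction l with
  | nil => simp [PySem.Dict.get?]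
  | cons a l ih =>
    rw [List.map_cons, PySem.Dict.get?_mk_cons]
    by_cases h : a = t
    · subst h; simp
    · have hmem : t ∈ a :: l ↔ t ∈ l := by simp [Ne.symm h, List.mem_cons]
      simp only [beq_iff_eq, if_neg h, ih, hmem]

lemma get?_mkInfo (p : List (Int × List Int)) (t : List Int) :
    (mkInfo p).get? t
      = if t ∈ dedupF (p.map Prod.snd) then some (t, minKey p t) else none := by
  rw [mkInfo, get?_mk_map]

lemma minKey_append_keep (p : List (Int × List Int)) (kv : Int × List Int) (v : List Int)
    (hne : kv.2 ≠ v) : minKey (p ++ [kv]) v = minKey p v := by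
  simp [minKey, occ_append_singleton, hne]

lemma minKey_append_self (p : List (Int × List Int)) (kv : Int × List Int)
    (hm : kv.2 ∈ p.map Prod.snd) : minKey (p ++ [kv]) kv.2 = min (minKey p kv.2) kv.1 := by
  rw [minKey, occ_append_singleton, if_pos rfl,
      minOf_append_singleton _ _ (occ_ne_nil_of_mem _ _ hm), minKey]

lemma minKey_append_new (p : List (Int × List Int)) (kv : Int × List Int)
    (hm : kv.2 ∉ p.map Prod.snd) : minKey (p ++ [kv]) kv.2 = kv.1 := by
  rw [minKey, occ_append_singleton, if_pos rfl, occ_eq_nil_of_not_mem _ _ hm]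
  simp [minOf]

lemma stepB_eq (p : List (Int × List Int)) (kv : Int × List Int) :
    (match (mkInfo p).get? kv.2 with
      | none => (mkInfo p).insert kv.2 (kv.2, kv.1)
      | some e => if kv.1 < e.2 then (mkInfo p).insert kv.2 (e.1, kv.1) else mkInfo p)
      = mkInfo (p ++ [kv]) := by
  have hmapsnd : (p ++ [kv]).map Prod.snd = p.map Prod.snd ++ [kv.2] := by simp
  by_cases hm : kv.2 ∈ p.map Prod.snd
  · have hd : kv.2 ∈ dedupF (p.map Prod.snd) := (mem_dedupF _ _).mpr hm
    have hcont : (mkInfo p).contains kv.2 = true := by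
      rw [PySem.Dict.contains_eq_isSome_get?, get?_mkInfo, if_pos hd]; rfl
    have hded : dedupF ((p ++ [kv]).map Prod.snd) = dedupF (p.map Prod.snd) := by
      rw [hmapsnd, dedupF_append_singleton, if_pos hm]
    rw [get?_mkInfo, if_pos hd]
    by_cases hlt : kv.1 < minKey p kv.2
    · simp only [if_pos hlt]
      apply PySem.Dict.ext
      rw [PySem.Dict.items_insert_of_contains _ _ hcont]
      show ((dedupF (p.map Prod.snd)).map (fun v => (v, (v, minKey p v)))).map
          (fun pr => if pr.1 == kv.2 then (kv.2, (kv.2, kv.1)) else pr)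
        = (dedupF ((p ++ [kv]).map Prod.snd)).map (fun v => (v, (v, minKey (p ++ [kv]) v)))
      rw [hded, List.map_map]
      apply List.map_congr_left
      intro v hv
      by_cases hveq : v = kv.2
      · subst hveq
        simp [minKey_append_self p kv hm, min_eq_right (le_of_lt hlt), hlt]
      · have : kv.2 ≠ v := fun h => hveq h.symm
        simp [Function.comp, hveq, minKey_append_keep p kv v this]
    · simp only [if_neg hlt]
      apply PySem.Dict.ext
      show (dedupF (p.map Prod.snd)).map (fun v => (v, (v, minKey p v)))
        = (dedupF ((p ++ [kv]).map Prod.snd)).map (fun v => (v, (v, minKey (p ++ [kv]) v)))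
      rw [hded]
      apply List.map_congr_left
      intro v hv
      by_cases hveq : v = kv.2
      · subst hveq
        simp [minKey_append_self p kv hm, min_eq_left (le_of_not_gt hlt)]
      · have : kv.2 ≠ v := fun h => hveq h.symm
        simp [minKey_append_keep p kv v this]
  · have hd : kv.2 ∉ dedupF (p.map Prod.snd) := fun h => hm ((mem_dedupF _ _).mp h)
    have hcont : (mkInfo p).contains kv.2 = false := by
      rw [PySem.Dict.contains_eq_isSome_get?, get?_mkInfo, if_neg hd]; rfl
    have hded : dedupF ((p ++ [kv]).map Prod.snd) = dedupF (p.map Prod.snd) ++ [kv.2] := by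
      rw [hmapsnd, dedupF_append_singleton, if_neg hm]
    rw [get?_mkInfo, if_neg hd]
    apply PySem.Dict.ext
    rw [PySem.Dict.items_insert_of_not_contains _ _ hcont]
    show (dedupF (p.map Prod.snd)).map (fun v => (v, (v, minKey p v))) ++ [(kv.2, (kv.2, kv.1))]
      = (dedupF ((p ++ [kv]).map Prod.snd)).map (fun v => (v, (v, minKey (p ++ [kv]) v)))
    rw [hded, List.map_append]
    congr 1
    · apply List.map_congr_left
      intro v hv
      have hvm : v ∈ p.map Prod.snd := (mem_dedupF _ _).mp hv
      have : kv.2 ≠ v := fun h => hm (h ▸ hvm)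
      simp [minKey_append_keep p kv v this]
    · simp [minKey_append_new p kv hm]

lemma infoLoop_eq (ws : List (Int × List Int)) : ∀ (p : List (Int × List Int)),
    ws.foldl (fun info kv =>
      match info.get? kv.2 with
      | none => info.insert kv.2 (kv.2, kv.1)
      | some e => if kv.1 < e.2 then info.insert kv.2 (e.1, kv.1) else info) (mkInfo p)
      = mkInfo (p ++ ws) := by
  induction ws with
  | nil => intro p; simp
  | cons kv ws ih =>
    intro p
    simp only [List.foldl_cons]
    rw [stepB_eq, ih]
    simp

lemma empty_eq_mkInfo_nil :
    (PySem.Dict.empty : PySem.Dict (List Int) (List Int × Int)) = mkInfo [] := by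
  apply PySem.Dict.ext
  have h0 : dedupF [] = [] := by simp [dedupF]
  simp [mkInfo, h0, PySem.Dict.empty]

-- ===== VERDICT (by name: the statement is the Claim_ definition above) =====
theorem merge_identical_groups_py_spec : Claim_equal_merge_identical_groups_py := by
  intro groups _dom
  unfold Spec_merge_identical_groups_py
  rw [merge_identical_groups_py, merge_identical_groups_py_alt,
      mergeLoopA_eq groups _ _ (fun v hv => hv)]
  rw [empty_eq_mkInfo_nil, infoLoop_eq, List.nil_append, mkInfo, PySem.Dict.values_mk,
      List.map_map]
  have hmapped : (List.map ((fun x => x.2) ∘ fun v => (v, (v, minKey groups.reverse v)))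
      (dedupF (List.map Prod.snd groups.reverse)))
      = (dedupF ((groups.map Prod.snd).reverse)).map (fun v => (v, minKey groups.reverse v)) := by
    rw [List.map_reverse]
    rfl
  rw [hmapped, List.foldl_map]
  have hcongr := PySem.List.foldl_congr_mem (dedupF ((groups.map Prod.snd).reverse))
    (fun (g : PySem.Dict Int (List Int)) v => g.insert (minKey groups v) v)
    (fun g v => g.insert (minKey groups.reverse v) v) PySem.Dict.empty ?_
  · rw [← hcongr]
  · intro acc v hv
    have hvm : v ∈ groups.map Prod.snd := by
      have := (mem_dedupF _ _).mp hv
      simpa using List.mem_reverse.mp this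
    show acc.insert (minKey groups v) v = acc.insert (minKey groups.reverse v) v
    rw [minKey_reverse groups v hvm]
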